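-- pv_equiv track=rewrite | github.com/bjorger/advent-of-code-2023 | Day_2/main.py | find_power_of_fewest_cubes_possible
-- ===== SOURCE A (Python) =====
-- def find_power_of_fewest_cubes_possible(line: str) -> int:
--     if len(line) == 0:
--         return 0
--
--     relevant_information = line.split(":")
--     games = relevant_information[1].split(";")
--
--     blue = 0
--     red = 0
--     green = 0
--
--     for game in games:
--         split_game = game.split(",")
--         for split in split_game:
--             blue_index = split.find("blue")
--             red_index = split.find("red")
--             green_index = split.find("green")
--
--             if blue_index != -1:
--                 new_blue = int(split.replace("blue", "").replace(" ", ""))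
--                 if blue < new_blue:
--                     blue = new_blue
--
--             if red_index != -1:
--                 new_red = int(split.replace("red", "").replace(" ", ""))
--                 if red < new_red:
--                     red = new_red
--
--             if green_index != -1:
--                 new_green = int(split.replace("green", "").replace(" ", ""))
--                 if green < new_green:
--                     green = new_green
--
--     return blue * red * green
-- ===== SOURCE B (Python) =====
-- COLORS = ("blue", "red", "green")
--
--
-- def find_power_of_fewest_cubes_possible(line: str) -> int:
--     if len(line) == 0:
--         return 0
--
--     games = line.split(":")[1]
--
--     pairs = [(c, 0) for c in COLORS]
--     for seg in games.split(";"):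
--         for token in seg.split(","):
--             for c in COLORS:
--                 if c in token:
--                     pairs.append((c, int(token.replace(c, "").replace(" ", ""))))
--
--     pairs.sort(key=lambda p: p[1], reverse=True)
--
--     power = 1
--     for c in COLORS:
--         power *= next(v for col, v in pairs if col == c)
--     return power
-- ===== Notes on version B (the rewrite author's own statement) =====
-- stated objective: alternative
-- what changed: Replaces A's three running (blue,red,green) maxima updated inside nested split loops by a sort-based selection: collect (colour, value) pairs seeded with (colour, 0), sort them once by value descending, and take the first pair of each colour; the product of those three firsts is the answer.
import Mathlib
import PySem

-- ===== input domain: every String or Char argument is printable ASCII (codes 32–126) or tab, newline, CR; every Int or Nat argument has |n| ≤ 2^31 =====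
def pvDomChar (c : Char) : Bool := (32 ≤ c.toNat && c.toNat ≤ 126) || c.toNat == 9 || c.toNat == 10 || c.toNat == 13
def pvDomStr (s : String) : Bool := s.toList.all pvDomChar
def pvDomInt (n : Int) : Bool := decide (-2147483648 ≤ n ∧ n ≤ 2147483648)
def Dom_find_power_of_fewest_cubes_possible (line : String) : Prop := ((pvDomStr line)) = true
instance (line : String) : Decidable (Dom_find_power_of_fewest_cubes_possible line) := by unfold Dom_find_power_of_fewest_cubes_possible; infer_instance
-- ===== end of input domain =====

-- B replaces A's running (blue,red,green) maxima inside nested split loops by a sort-based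
-- selection: collect (colour, value) pairs (seeded with (colour, 0)), sort once by value
-- descending, and take the first pair of each colour (objective: alternative); return value only.

-- the residue value A and B both compute for a token containing a colour word:
-- int(token.replace(colour, "").replace(" ", ""))
def pvVal (c t : String) : Int :=
  (PySem.Int.ofStr? (PySem.Str.replace (PySem.Str.replace t c "") " " "")).getD 0

-- ===== PORT A =====
-- the body of A's inner `for split in split_game` loop, on the state (blue, red, green)
def pvStepA (st : Int × Int × Int) (split : String) : Int × Int × Int :=
  let blue_index := PySem.Str.find split "blue"
  let red_index := PySem.Str.find split "red"
  let green_index := PySem.Str.find split "green"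
  let st :=
    if blue_index ≠ -1 then
      let new_blue := pvVal "blue" split
      if st.1 < new_blue then (new_blue, st.2.1, st.2.2) else st
    else st
  let st :=
    if red_index ≠ -1 then
      let new_red := pvVal "red" split
      if st.2.1 < new_red then (st.1, new_red, st.2.2) else st
    else st
  let st :=
    if green_index ≠ -1 then
      let new_green := pvVal "green" split
      if st.2.2 < new_green then (st.1, st.2.1, new_green) else st
    else st
  st

def find_power_of_fewest_cubes_possible (line : String) : Int :=
  if PySem.Str.len line = 0 then 0
  else
    let relevant_information := (PySem.Str.split? line ":").getD []
    let games := (PySem.Str.split? ((PySem.List.pyGet? relevant_information 1).getD "") ";").getD []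
    let res : Int × Int × Int :=
      games.foldl (fun st game => ((PySem.Str.split? game ",").getD []).foldl pvStepA st) (0, 0, 0)
    res.1 * res.2.1 * res.2.2

-- ===== PORT B =====
def pvColors : List String := ["blue", "red", "green"]

def find_power_of_fewest_cubes_possible_alt (line : String) : Int :=
  if PySem.Str.len line = 0 then 0
  else
    let games := (PySem.List.pyGet? ((PySem.Str.split? line ":").getD []) 1).getD ""
    let pairs0 := pvColors.map (fun c => (c, (0 : Int)))
    let pairs := ((PySem.Str.split? games ";").getD []).foldl (fun ps seg =>
        ((PySem.Str.split? seg ",").getD []).foldl (fun ps token =>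
          pvColors.foldl (fun ps c =>
            if PySem.Str.isIn c token then ps ++ [(c, pvVal c token)] else ps) ps) ps) pairs0
    let spairs := PySem.List.sorted pairs (fun p => p.2) true
    -- next(v for col, v in spairs if col == c): the seed (c, 0) guarantees a match,
    -- so the .getD 0 default of this total encoding is never taken
    pvColors.foldl (fun power c =>
      power * ((spairs.find? (fun p => p.1 == c)).map Prod.snd).getD 0) 1

-- ===== PRECONDITION & SPEC =====
-- Pre_ excludes exactly the inputs on which the Python A raises: a non-empty line with no ':'
-- (IndexError), and lines where some comma token contains a colour word whose residue after
-- deleting that word and all spaces is not an int literal (ValueError); A returns on all others.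
def pvResidueOk (t c : String) : Prop :=
  PySem.Str.isIn c t = true →
    (PySem.Int.ofStr? (PySem.Str.replace (PySem.Str.replace t c "") " " "")).isSome = true

def Pre_find_power_of_fewest_cubes_possible (line : String) : Prop :=
  line = "" ∨
    (PySem.Str.isIn ":" line = true ∧
      ∀ t ∈ ((PySem.Str.split? ((PySem.List.pyGet? ((PySem.Str.split? line ":").getD []) 1).getD "") ";").getD []).flatMap
              (fun seg => (PySem.Str.split? seg ",").getD []),
        pvResidueOk t "blue" ∧ pvResidueOk t "red" ∧ pvResidueOk t "green")

instance (line : String) : Decidable (Pre_find_power_of_fewest_cubes_possible line) := by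
  unfold Pre_find_power_of_fewest_cubes_possible pvResidueOk; infer_instance

def pvWitness_find_power_of_fewest_cubes_possible : String := ": 1 red"

def Spec_find_power_of_fewest_cubes_possible (line : String) (out : Int) : Prop := out = find_power_of_fewest_cubes_possible_alt line
instance (line : String) (out : Int) : Decidable (Spec_find_power_of_fewest_cubes_possible line out) := by unfold Spec_find_power_of_fewest_cubes_possible; infer_instance

-- ===== CLAIM (what is proved, stated in full; the proofs are below) =====
def Claim_equal_find_power_of_fewest_cubes_possible : Prop := ∀ (line : String), Dom_find_power_of_fewest_cubes_possible line → Pre_find_power_of_fewest_cubes_possible line → Spec_find_power_of_fewest_cubes_possible line (find_power_of_fewest_cubes_possible line)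

-- ===== LEMMAS AND PROOFS =====

-- the per-colour running-max step A's three branches perform
def pvMaxStep (c : String) (b : Int) (t : String) : Int :=
  if PySem.Str.isIn c t then (if b < pvVal c t then pvVal c t else b) else b

-- the colour-c values a token list contributes
def pvVals (c : String) (toks : List String) : List Int :=
  toks.filterMap (fun t => if PySem.Str.isIn c t then some (pvVal c t) else none)

theorem pvVals_cons (c t : String) (ts : List String) :
    pvVals c (t :: ts) = if PySem.Str.isIn c t then pvVal c t :: pvVals c ts else pvVals c ts := by
  by_cases h : PySem.Str.isIn c t <;>
    simp only [pvVals, List.filterMap_cons, PySem.Str.isIn] at h ⊢ <;> simp [h]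

-- A's interleaved update of the (blue, red, green) triple acts componentwise
theorem pvStepA_eq (st : Int × Int × Int) (t : String) :
    pvStepA st t = (pvMaxStep "blue" st.1 t, pvMaxStep "red" st.2.1 t, pvMaxStep "green" st.2.2 t) := by
  obtain ⟨b, r, g⟩ := st
  simp only [pvStepA, pvMaxStep, ne_eq, PySem.Str.find_eq_neg_one_iff, PySem.Str.isIn_iff_infix]
  split_ifs <;> simp_all

theorem pv_fold_triple (toks : List String) (st : Int × Int × Int) :
    toks.foldl pvStepA st =
      (toks.foldl (pvMaxStep "blue") st.1,
       toks.foldl (pvMaxStep "red") st.2.1,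
       toks.foldl (pvMaxStep "green") st.2.2) := by
  induction toks generalizing st with
  | nil => rfl
  | cons t ts ih =>
    simp only [List.foldl_cons]
    rw [ih, pvStepA_eq]

theorem pv_games (G : List String) :
    G.foldl (fun st game => ((PySem.Str.split? game ",").getD []).foldl pvStepA st) ((0 : Int), (0 : Int), (0 : Int))
      = ((G.flatMap (fun g => (PySem.Str.split? g ",").getD [])).foldl (pvMaxStep "blue") 0,
         (G.flatMap (fun g => (PySem.Str.split? g ",").getD [])).foldl (pvMaxStep "red") 0,
         (G.flatMap (fun g => (PySem.Str.split? g ",").getD [])).foldl (pvMaxStep "green") 0) := by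
  rw [← List.foldl_flatMap]
  exact pv_fold_triple _ _

-- A's per-colour fold is the running max over the colour's value list
theorem pv_maxfold_eq (c : String) (toks : List String) (b : Int) :
    toks.foldl (pvMaxStep c) b = (pvVals c toks).foldl max b := by
  induction toks generalizing b with
  | nil => rfl
  | cons t ts ih =>
    rw [List.foldl_cons, ih, pvVals_cons]
    by_cases h : PySem.Str.isIn c t
    · rw [if_pos h, List.foldl_cons]
      have hs : pvMaxStep c b t = max b (pvVal c t) := by
        rw [pvMaxStep, if_pos h, max_def]; split_ifs <;> omega
      rw [hs]
    · rw [if_neg h]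
      have hs : pvMaxStep c b t = b := by rw [pvMaxStep, if_neg h]
      rw [hs]

-- B's pair list in closed form: seeds ++ one pair per (token, colour word it contains)
theorem pv_pairs_eq (G : List String) :
    G.foldl (fun ps seg =>
        ((PySem.Str.split? seg ",").getD []).foldl (fun ps token =>
          pvColors.foldl (fun ps c =>
            if PySem.Str.isIn c token then ps ++ [(c, pvVal c token)] else ps) ps) ps)
      (pvColors.map (fun c => (c, (0 : Int))))
    = pvColors.map (fun c => (c, (0 : Int))) ++
        (G.flatMap (fun g => (PySem.Str.split? g ",").getD [])).flatMap
          (fun t => (pvColors.filter (fun c => PySem.Str.isIn c t)).map (fun c => (c, pvVal c t))) := by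
  have hstep : ∀ (ps : List (String × Int)) (token : String),
      pvColors.foldl (fun ps c =>
        if PySem.Str.isIn c token then ps ++ [(c, pvVal c token)] else ps) ps
      = ps ++ (pvColors.filter (fun c => PySem.Str.isIn c token)).map (fun c => (c, pvVal c token)) :=
    fun ps token => PySem.List.foldl_append_if _ _ _ _
  have htok : ∀ (seg : String) (ps : List (String × Int)),
      ((PySem.Str.split? seg ",").getD []).foldl (fun ps token =>
        pvColors.foldl (fun ps c =>
          if PySem.Str.isIn c token then ps ++ [(c, pvVal c token)] else ps) ps) ps
      = ps ++ ((PySem.Str.split? seg ",").getD []).flatMap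
          (fun t => (pvColors.filter (fun c => PySem.Str.isIn c t)).map (fun c => (c, pvVal c t))) := by
    intro seg ps
    have e1 : ((PySem.Str.split? seg ",").getD []).foldl (fun ps token =>
          pvColors.foldl (fun ps c =>
            if PySem.Str.isIn c token then ps ++ [(c, pvVal c token)] else ps) ps) ps
        = ((PySem.Str.split? seg ",").getD []).foldl (fun ps t =>
            ps ++ (pvColors.filter (fun c => PySem.Str.isIn c t)).map (fun c => (c, pvVal c t))) ps :=
      PySem.List.foldl_congr_mem _ _ _ _ (fun ps token _ => hstep ps token)
    rw [e1]
    exact PySem.List.foldl_append_eq_flatMap _ _ _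
  have e2 : G.foldl (fun ps seg =>
        ((PySem.Str.split? seg ",").getD []).foldl (fun ps token =>
          pvColors.foldl (fun ps c =>
            if PySem.Str.isIn c token then ps ++ [(c, pvVal c token)] else ps) ps) ps)
      (pvColors.map (fun c => (c, (0 : Int))))
      = G.foldl (fun ps seg =>
          ps ++ ((PySem.Str.split? seg ",").getD []).flatMap
            (fun t => (pvColors.filter (fun c => PySem.Str.isIn c t)).map (fun c => (c, pvVal c t))))
        (pvColors.map (fun c => (c, (0 : Int)))) :=
    PySem.List.foldl_congr_mem _ _ _ _ (fun ps seg _ => htok seg ps)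
  rw [e2]
  rw [PySem.List.foldl_append_eq_flatMap]
  rw [List.flatMap_assoc]

-- extracting the colour-c values from one token's pair contribution
theorem pv_token_cvals (c t : String) (hc : c = "blue" ∨ c = "red" ∨ c = "green") :
    ((pvColors.filter (fun c' => PySem.Str.isIn c' t)).map (fun c' => (c', pvVal c' t))).filterMap
        (fun p => if p.1 = c then some p.2 else none)
      = if PySem.Str.isIn c t then [pvVal c t] else [] := by
  rcases hc with rfl | rfl | rfl <;>
    · simp only [pvColors, List.filter_cons, List.filter_nil]
      cases hb : PySem.Str.isIn "blue" t <;> cases hr : PySem.Str.isIn "red" t <;>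
        cases hg : PySem.Str.isIn "green" t <;> simp

-- the colour-c values of B's whole pair list: a seed 0 followed by the token values
theorem pv_pairs_cvals (c : String) (hc : c = "blue" ∨ c = "red" ∨ c = "green")
    (toks : List String) :
    (pvColors.map (fun c' => (c', (0 : Int))) ++
        toks.flatMap (fun t => (pvColors.filter (fun c' => PySem.Str.isIn c' t)).map
          (fun c' => (c', pvVal c' t)))).filterMap (fun p => if p.1 = c then some p.2 else none)
      = 0 :: pvVals c toks := by
  rw [List.filterMap_append]
  have h1 : (pvColors.map (fun c' => (c', (0 : Int)))).filterMap
      (fun p => if p.1 = c then some p.2 else none) = [(0 : Int)] := by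
    rcases hc with rfl | rfl | rfl <;> simp [pvColors]
  have h2 : (toks.flatMap (fun t => (pvColors.filter (fun c' => PySem.Str.isIn c' t)).map
      (fun c' => (c', pvVal c' t)))).filterMap (fun p => if p.1 = c then some p.2 else none)
      = pvVals c toks := by
    induction toks with
    | nil => rfl
    | cons t ts ih =>
      rw [List.flatMap_cons, List.filterMap_append, ih, pv_token_cvals c t hc, pvVals_cons]
      cases h : PySem.Str.isIn c t <;> simp
  rw [h1, h2]
  rfl

-- in a list sorted by descending value, the first pair of a colour carries that colour's maximum
theorem pv_find_sorted {L : List (String × Int)} (hs : L.Pairwise (fun a b => b.2 ≤ a.2))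
    {c : String} {m : String × Int} (hf : L.find? (fun p => p.1 == c) = some m) :
    m.1 = c ∧ m ∈ L ∧ ∀ p ∈ L, p.1 = c → p.2 ≤ m.2 := by
  induction L with
  | nil => simp at hf
  | cons x xs ih =>
    rcases List.pairwise_cons.mp hs with ⟨hx, hxs⟩
    by_cases hx1 : x.1 = c
    · rw [List.find?_cons_of_pos (by simp [hx1])] at hf
      cases hf
      refine ⟨hx1, List.mem_cons_self, ?_⟩
      intro p hp _
      rcases List.mem_cons.mp hp with rfl | hp'
      · exact le_refl _
      · exact hx p hp'
    · rw [List.find?_cons_of_neg (by simp [hx1])] at hf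
      rcases ih hxs hf with ⟨h1, h2, h3⟩
      refine ⟨h1, List.mem_cons_of_mem _ h2, ?_⟩
      intro p hp hpc
      rcases List.mem_cons.mp hp with rfl | hp'
      · exact absurd hpc hx1
      · exact h3 p hp' hpc

-- the first pair of colour c in B's sorted pair list carries A's running maximum for c
theorem pv_color_eq (c : String) (hc : c = "blue" ∨ c = "red" ∨ c = "green") (toks : List String) :
    (((PySem.List.sorted (pvColors.map (fun c' => (c', (0 : Int))) ++
          toks.flatMap (fun t => (pvColors.filter (fun c' => PySem.Str.isIn c' t)).map
            (fun c' => (c', pvVal c' t)))) (fun p => p.2) true).find?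
        (fun p => p.1 == c)).map Prod.snd).getD 0
      = (pvVals c toks).foldl max 0 := by
  set P := pvColors.map (fun c' => (c', (0 : Int))) ++
      toks.flatMap (fun t => (pvColors.filter (fun c' => PySem.Str.isIn c' t)).map
        (fun c' => (c', pvVal c' t))) with hP
  set S := PySem.List.sorted P (fun p => p.2) true with hS
  have hmem : ∀ p : String × Int, p ∈ S ↔ p ∈ P := fun p => PySem.List.mem_sorted P (fun q => q.2) true p
  have hpair : S.Pairwise (fun a b => b.2 ≤ a.2) := PySem.List.sorted_pairwise_rev P (fun q => q.2)
  have hseed : ((c, (0 : Int)) : String × Int) ∈ P := by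
    apply List.mem_append_left
    rcases hc with rfl | rfl | rfl <;> simp [pvColors]
  have hsome : ∃ m, S.find? (fun p => p.1 == c) = some m := by
    have hx : (S.find? (fun p => p.1 == c)).isSome := by
      rw [List.find?_isSome]
      exact ⟨(c, 0), (hmem _).mpr hseed, by simp⟩
    exact Option.isSome_iff_exists.mp hx
  obtain ⟨m, hf⟩ := hsome
  obtain ⟨hm1, hm2, hm3⟩ := pv_find_sorted hpair hf
  have hcv := pv_pairs_cvals c hc toks
  rw [← hP] at hcv
  have hm2v : m.2 ∈ (0 : Int) :: pvVals c toks := by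
    rw [← hcv]
    exact List.mem_filterMap.mpr ⟨m, (hmem m).mp hm2, by simp [hm1]⟩
  set F := (pvVals c toks).foldl max 0 with hF
  have hub := PySem.List.le_foldl_max (pvVals c toks) 0
  have hle : m.2 ≤ F := by
    rcases List.mem_cons.mp hm2v with h | h
    · rw [h]; exact hub.1
    · exact hub.2 _ h
  have hge : F ≤ m.2 := by
    have hFmem : F ∈ (0 : Int) :: pvVals c toks := by
      rcases PySem.List.foldl_max_mem (pvVals c toks) 0 with h | h
      · rw [hF, h]; exact List.mem_cons_self
      · exact List.mem_cons_of_mem _ h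
    rw [← hcv] at hFmem
    obtain ⟨p, hpP, hpf⟩ := List.mem_filterMap.mp hFmem
    have hp1 : p.1 = c ∧ p.2 = F := by
      by_cases h : p.1 = c <;> simp [h] at hpf
      exact ⟨h, hpf⟩
    rw [← hp1.2]
    exact hm3 p ((hmem p).mpr hpP) hp1.1
  rw [hf]
  simp only [Option.map_some, Option.getD_some]
  omega

-- ===== VERDICT (by name: the statement is the Claim_ definition above) =====
set_option maxHeartbeats 1000000 in
theorem find_power_of_fewest_cubes_possible_spec : Claim_equal_find_power_of_fewest_cubes_possible := by
  intro line _ _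
  unfold Spec_find_power_of_fewest_cubes_possible
  unfold find_power_of_fewest_cubes_possible find_power_of_fewest_cubes_possible_alt
  by_cases h : PySem.Str.len line = 0
  · rw [if_pos h, if_pos h]
  · rw [if_neg h, if_neg h]
    simp only [pv_games, pv_pairs_eq, pv_maxfold_eq]
    have hb := pv_color_eq "blue" (Or.inl rfl)
    have hr := pv_color_eq "red" (Or.inr (Or.inl rfl))
    have hg := pv_color_eq "green" (Or.inr (Or.inr rfl))
    simp only [pvColors] at hb hr hg
    simp only [pvColors, List.foldl_cons, List.foldl_nil, one_mul]
    rw [hb, hr, hg]
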